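-- pv_equiv track=rewrite | github.com/aagnes78/word-games | wordgrid.py | check_lettercount_in_word
-- ===== SOURCE A (Python) =====
-- from collections import Counter
--
-- def check_lettercount_in_word(word, lettercount):
--     lettercount_word = Counter(word)
--     for letter in lettercount_word:
--         if letter not in lettercount:
--             return False
--         else:
--             if lettercount_word[letter] > lettercount[letter]:
--                 return False
--     return True
-- ===== SOURCE B (Python) =====
-- def check_lettercount_in_word(word, lettercount):
--     remaining = dict(lettercount)
--     for ch in word:
--         if ch not in remaining:
--             return False
--         remaining[ch] -= 1
--         if remaining[ch] < 0:
--             return False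
--     return True
-- ===== Notes on version B (the rewrite author's own statement) =====
-- stated objective: alternative
-- what changed: Instead of building a Counter of the word and comparing each distinct letter's count against the allowance, B copies the allowance into a mutable remaining-budget dict and scans the word character by character, decrementing the budget and failing when a character is missing or its budget goes negative.
import Mathlib
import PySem

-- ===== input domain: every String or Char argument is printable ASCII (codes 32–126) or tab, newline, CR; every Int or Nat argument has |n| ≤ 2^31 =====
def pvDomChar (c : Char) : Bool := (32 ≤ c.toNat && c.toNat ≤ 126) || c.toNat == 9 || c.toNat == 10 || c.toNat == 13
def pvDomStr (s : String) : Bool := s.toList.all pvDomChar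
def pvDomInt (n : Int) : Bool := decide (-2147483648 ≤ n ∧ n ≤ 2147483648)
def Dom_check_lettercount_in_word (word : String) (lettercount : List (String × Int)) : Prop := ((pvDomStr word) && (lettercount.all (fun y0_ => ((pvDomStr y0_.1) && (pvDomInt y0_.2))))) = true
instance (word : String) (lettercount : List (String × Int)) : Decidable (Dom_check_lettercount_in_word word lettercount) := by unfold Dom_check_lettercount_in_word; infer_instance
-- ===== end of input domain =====

-- B replaces A's Counter-then-compare pass over distinct letters by a single scan of the word
-- that decrements a mutable remaining-budget copy of lettercount (objective: alternative).


-- a Python character (iterating a str yields 1-char strings)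
def pvToS (c : Char) : String := String.ofList [c]

-- ===== PORT A =====
-- the 'for letter in lettercount_word: …' loop with its two early returns
def pvGoA (cnt lcd : PySem.Dict String Int) : List String → Bool
  | [] => true
  | k :: rest =>
    if lcd.contains k = false then false
    else if cnt.getD k 0 > lcd.getD k 0 then false
    else pvGoA cnt lcd rest

def check_lettercount_in_word (word : String) (lettercount : List (String × Int)) : Bool :=
  -- lettercount_word = Counter(word); the dict argument is the assoc list viewed as a dict
  let cnt := PySem.Dict.counter (word.toList.map pvToS)
  pvGoA cnt (PySem.Dict.mk lettercount) cnt.keys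

-- ===== PORT B =====
-- the 'for ch in word: …' loop over the remaining-budget dict
def pvGoB : List Char → PySem.Dict String Int → Bool
  | [], _ => true
  | c :: rest, d =>
    match d.get? (pvToS c) with
    | none => false
    | some v =>
      let d' := d.insert (pvToS c) (v - 1)
      if v - 1 < 0 then false else pvGoB rest d'

def check_lettercount_in_word_alt (word : String) (lettercount : List (String × Int)) : Bool :=
  -- remaining = dict(lettercount): a copy of the dict the assoc list denotes
  pvGoB word.toList (PySem.Dict.mk lettercount)

-- ===== PRECONDITION & SPEC =====
def Spec_check_lettercount_in_word (word : String) (lettercount : List (String × Int)) (out : Bool) : Prop := out = check_lettercount_in_word_alt word lettercount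
instance (word : String) (lettercount : List (String × Int)) (out : Bool) : Decidable (Spec_check_lettercount_in_word word lettercount out) := by unfold Spec_check_lettercount_in_word; infer_instance

-- ===== CLAIM (what is proved, stated in full; the proofs are below) =====
def Claim_equal_check_lettercount_in_word : Prop := ∀ (word : String) (lettercount : List (String × Int)), Dom_check_lettercount_in_word word lettercount → Spec_check_lettercount_in_word word lettercount (check_lettercount_in_word word lettercount)

-- ===== LEMMAS AND PROOFS =====

theorem pvToS_inj : Function.Injective pvToS := by
  intro b c h
  have := congrArg String.toList h
  simpa [pvToS] using this

-- the property both programs decide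
def pvFits (d : PySem.Dict String Int) (r : List Char) : Prop :=
  ∀ c ∈ r, ∃ v, d.get? (pvToS c) = some v ∧ (r.count c : Int) ≤ v

theorem pvGoB_iff (r : List Char) : ∀ d : PySem.Dict String Int,
    pvGoB r d = true ↔ pvFits d r := by
  induction r with
  | nil => intro d; simp [pvGoB, pvFits]
  | cons c rest ih =>
    intro d
    unfold pvGoB
    cases hg : d.get? (pvToS c) with
    | none =>
      simp only [Bool.false_eq_true, false_iff]
      intro hP
      obtain ⟨v, hv, _⟩ := hP c (List.mem_cons_self)
      simp [hg] at hv
    | some v =>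
      by_cases hv1 : v - 1 < 0
      · simp only [hv1, if_true, Bool.false_eq_true, false_iff]
        intro hP
        obtain ⟨w, hw, hcnt⟩ := hP c (List.mem_cons_self)
        rw [hg] at hw
        obtain rfl : v = w := by injection hw
        have : 1 ≤ (((c :: rest).count c : Nat) : Int) := by
          have := List.count_pos_iff.mpr (List.mem_cons_self (a := c) (l := rest))
          exact_mod_cast this
        omega
      · simp only [hv1, if_false]
        rw [ih]
        constructor
        · intro hP b hb
          by_cases hbc : b = c
          · subst hbc
            refine ⟨v, hg, ?_⟩
            by_cases hbr : b ∈ rest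
            · obtain ⟨w, hw, hcnt⟩ := hP b hbr
              rw [PySem.Dict.get?_insert_self] at hw
              obtain rfl : v - 1 = w := by injection hw
              simp only [List.count_cons_self]
              push_cast
              omega
            · simp only [List.count_cons_self, List.count_eq_zero_of_not_mem hbr]
              omega
          · obtain ⟨w, hw, hcnt⟩ := hP b (by cases hb with
              | head => exact absurd rfl hbc
              | tail _ h => exact h)
            rw [PySem.Dict.get?_insert_of_ne _ _ (fun h => hbc (pvToS_inj h))] at hw
            exact ⟨w, hw, by rwa [List.count_cons_of_ne (Ne.symm hbc)]⟩
        · intro hP b hb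
          by_cases hbc : b = c
          · subst hbc
            obtain ⟨w, hw, hcnt⟩ := hP b (List.mem_cons_self)
            rw [hg] at hw
            obtain rfl : v = w := by injection hw
            refine ⟨v - 1, PySem.Dict.get?_insert_self _ _ _, ?_⟩
            rw [List.count_cons_self] at hcnt
            push_cast at hcnt ⊢
            omega
          · obtain ⟨w, hw, hcnt⟩ := hP b (List.mem_cons_of_mem _ hb)
            rw [List.count_cons_of_ne (Ne.symm hbc)] at hcnt
            exact ⟨w, by rw [PySem.Dict.get?_insert_of_ne _ _ (fun h => hbc (pvToS_inj h))]; exact hw, hcnt⟩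

theorem pvGoA_eq_all (cnt lcd : PySem.Dict String Int) (ks : List String) :
    pvGoA cnt lcd ks = ks.all (fun k => lcd.contains k && decide (cnt.getD k 0 ≤ lcd.getD k 0)) := by
  induction ks with
  | nil => rfl
  | cons k rest ih =>
    unfold pvGoA
    by_cases hc : lcd.contains k = false
    · simp [hc]
    · rw [Bool.not_eq_false] at hc
      by_cases hgt : cnt.getD k 0 > lcd.getD k 0
      · simp [hc, hgt]
      · simp only [hc, Bool.true_eq_false, if_false, hgt, if_false, List.all_cons, ih,
          Bool.true_and]
        have : cnt.getD k 0 ≤ lcd.getD k 0 := le_of_not_gt hgt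
        simp [this]

theorem pvGoA_iff (word : String) (lettercount : List (String × Int)) :
    check_lettercount_in_word word lettercount = true ↔
      pvFits (PySem.Dict.mk lettercount) word.toList := by
  unfold check_lettercount_in_word pvFits
  rw [pvGoA_eq_all, PySem.Dict.keys_counter, List.all_eq_true]
  constructor
  · intro h c hc
    have hk : pvToS c ∈ PySem.Set.ofList (word.toList.map pvToS) :=
      (PySem.Set.mem_ofList _ _).mpr (List.mem_map_of_mem hc)
    have := h _ hk
    rw [Bool.and_eq_true, decide_eq_true_iff] at this
    obtain ⟨hcon, hle⟩ := this
    rw [PySem.Dict.contains_eq_isSome_get?] at hcon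
    cases hg : (PySem.Dict.mk lettercount).get? (pvToS c) with
    | none => rw [hg] at hcon; simp at hcon
    | some v =>
      refine ⟨v, rfl, ?_⟩
      rw [PySem.Dict.getD_counter, List.count_map_of_injective _ _ pvToS_inj] at hle
      rw [PySem.Dict.getD_eq_get?_getD, hg] at hle
      exact hle
  · intro h k hk
    obtain ⟨c, hc, rfl⟩ := List.mem_map.mp ((PySem.Set.mem_ofList _ _).mp hk)
    obtain ⟨v, hg, hle⟩ := h c hc
    rw [Bool.and_eq_true, decide_eq_true_iff]
    constructor
    · rw [PySem.Dict.contains_eq_isSome_get?, hg]; rfl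
    · rw [PySem.Dict.getD_counter, List.count_map_of_injective _ _ pvToS_inj,
        PySem.Dict.getD_eq_get?_getD, hg]
      exact hle

-- ===== VERDICT (by name: the statement is the Claim_ definition above) =====
theorem check_lettercount_in_word_spec : Claim_equal_check_lettercount_in_word := by
  intro word lettercount _
  unfold Spec_check_lettercount_in_word
  rw [Bool.eq_iff_iff, pvGoA_iff]
  unfold check_lettercount_in_word_alt
  rw [pvGoB_iff]
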